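-- pv_equiv track=rewrite | github.com/michaelcrichlow/2024_11_16---is_carmichael | test_03.py | passes_fermat_primality_test
-- ===== SOURCE A (Python) =====
-- import math
--
-- def passes_fermat_primality_test(n: int) -> bool:
--     if n <= 1:
--         return False
--
--     for a in range(2, n):
--         if math.gcd(a, n) == 1:
--             if pow(a, n - 1, n) != 1:
--                 return False
--
--     return True
-- ===== SOURCE B (Python) =====
-- def _is_prime(p: int) -> bool:
--     i = 2
--     while i * i <= p:
--         if p % i == 0:
--             return False
--         i += 1
--     return True
--
--
-- def passes_fermat_primality_test(n: int) -> bool: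
--     # It suffices to check Fermat's congruence at the prime bases that do not
--     # divide n: every coprime base is a product of such primes.
--     if n <= 1:
--         return False
--     return all(pow(p, n - 1, n) == 1
--                for p in range(2, n)
--                if n % p != 0 and _is_prime(p))
-- ===== Notes on version B (the rewrite author's own statement) =====
-- stated objective: alternative
-- what changed: Instead of testing pow(a, n-1, n) at every base coprime to n, B tests it only at prime bases not dividing n (found by trial division), relying on the fact that every coprime base is a product of such primes, and is written as an all() over a filtered range rather than a loop with early return.
import Mathlib
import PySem

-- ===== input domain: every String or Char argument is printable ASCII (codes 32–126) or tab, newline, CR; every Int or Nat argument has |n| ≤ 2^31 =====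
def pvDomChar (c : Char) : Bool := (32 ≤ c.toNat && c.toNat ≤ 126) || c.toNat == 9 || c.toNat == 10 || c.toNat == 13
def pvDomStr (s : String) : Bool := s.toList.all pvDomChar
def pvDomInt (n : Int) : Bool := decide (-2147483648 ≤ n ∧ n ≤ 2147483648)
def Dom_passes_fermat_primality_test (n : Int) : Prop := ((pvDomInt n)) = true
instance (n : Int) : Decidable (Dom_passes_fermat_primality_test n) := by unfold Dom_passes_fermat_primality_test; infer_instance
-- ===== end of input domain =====

-- B checks Fermat's congruence only at the prime bases that do not divide n
-- (every coprime base is a product of such primes): an alternative decomposition.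

-- ===== PORT A =====
-- A's for-loop over range(2, n) with early `return False`, as structural recursion.
def fermatLoopA (n : Int) : List Int → Bool
  | [] => true
  | a :: rest =>
    if Int.gcd a n = 1 then                                    -- math.gcd(a, n) == 1
      if PySem.Int.powMod a (n - 1).toNat n ≠ 1 then false     -- pow(a, n-1, n) != 1
      else fermatLoopA n rest
    else fermatLoopA n rest

def passes_fermat_primality_test (n : Int) : Bool :=
  if n ≤ 1 then false
  else fermatLoopA n (PySem.List.pyRange 2 n)

-- ===== PORT B =====
-- `while i * i <= p: if p % i == 0: return False; i += 1; return True`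
def isPrimeLoop (p : Int) (i : Int) : Bool :=
  if h : i * i ≤ p then
    if PySem.Int.mod p i = 0 then false
    else isPrimeLoop p (i + 1)
  else true
termination_by (p + 2 - i).toNat
decreasing_by
  have hi : i ≤ p := by nlinarith [sq_nonneg i]
  omega

def pvIsPrime (p : Int) : Bool := isPrimeLoop p 2   -- _is_prime

-- all(pow(p, n-1, n) == 1 for p in range(2, n) if n % p != 0 and _is_prime(p))
def passes_fermat_primality_test_alt (n : Int) : Bool :=
  if n ≤ 1 then false
  else ((PySem.List.pyRange 2 n).filter
          (fun p => PySem.Int.mod n p ≠ 0 && pvIsPrime p)).all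
         (fun p => PySem.Int.powMod p (n - 1).toNat n == 1)

-- ===== PRECONDITION & SPEC =====
def Spec_passes_fermat_primality_test (n : Int) (out : Bool) : Prop := out = passes_fermat_primality_test_alt n
instance (n : Int) (out : Bool) : Decidable (Spec_passes_fermat_primality_test n out) := by unfold Spec_passes_fermat_primality_test; infer_instance

-- ===== CLAIM (what is proved, stated in full; the proofs are below) =====
def Claim_equal_passes_fermat_primality_test : Prop := ∀ (n : Int), Dom_passes_fermat_primality_test n → Spec_passes_fermat_primality_test n (passes_fermat_primality_test n)

-- ===== LEMMAS AND PROOFS =====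

-- Python pow(a, e, n) for a ≥ 0, n > 0, in terms of Nat arithmetic.
lemma powMod_eq_natCast (a n : Int) (e : ℕ) (ha : 0 ≤ a) (hn : 0 < n) :
    PySem.Int.powMod a e n = ((a.toNat ^ e % n.toNat : ℕ) : Int) := by
  unfold PySem.Int.powMod PySem.Int.mod
  rw [Int.fmod_eq_emod_of_nonneg _ hn.le]
  obtain ⟨a', rfl⟩ := Int.eq_ofNat_of_zero_le ha
  obtain ⟨n', rfl⟩ := Int.eq_ofNat_of_zero_le hn.le
  push_cast
  simp

lemma powMod_eq_one_iff (a n : Int) (e : ℕ) (ha : 0 ≤ a) (hn : 0 < n) :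
    PySem.Int.powMod a e n = 1 ↔ a.toNat ^ e % n.toNat = 1 := by
  rw [powMod_eq_natCast a n e ha hn]
  exact_mod_cast Int.natCast_inj (m := a.toNat ^ e % n.toNat) (n := 1)

lemma gcd_eq_one_iff (a n : Int) (ha : 0 ≤ a) (hn : 0 ≤ n) :
    Int.gcd a n = 1 ↔ Nat.Coprime a.toNat n.toNat := by
  have h1 : a.natAbs = a.toNat := by omega
  have h2 : n.natAbs = n.toNat := by omega
  simp [Int.gcd, Nat.Coprime, h1, h2]

-- the trial-division loop decides "no divisor j with i ≤ j and j * j ≤ p"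
lemma isPrimeLoop_eq_true (p i : Int) (hi : 0 ≤ i) :
    isPrimeLoop p i = true ↔ ∀ j : Int, i ≤ j → j * j ≤ p → ¬ j ∣ p := by
  revert hi
  fun_induction isPrimeLoop p i with
  | case1 i h hm =>
    intro hi
    simp only [Bool.false_eq_true, false_iff]
    push Not
    exact ⟨i, le_refl i, h, (PySem.Int.mod_eq_zero_iff_dvd p i).mp hm⟩
  | case2 i h hm ih =>
    intro hi
    rw [ih (by omega)]
    constructor
    · intro H j hij hjj
      rcases eq_or_lt_of_le hij with rfl | hlt
      · exact fun hd => hm ((PySem.Int.mod_eq_zero_iff_dvd _ _).mpr hd)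
      · exact H j (by omega) hjj
    · intro H j hij hjj
      exact H j (by omega) hjj
  | case3 i h =>
    intro hi
    simp only [true_iff]
    intro j hij hjj
    exact absurd (le_trans (by nlinarith) hjj) h

lemma pvIsPrime_iff (p : Int) (hp : 2 ≤ p) :
    pvIsPrime p = true ↔ Nat.Prime p.toNat := by
  have hpcast : ((p.toNat : Int)) = p := Int.toNat_of_nonneg (by omega)
  rw [pvIsPrime, isPrimeLoop_eq_true p 2 (by omega), Nat.prime_def_le_sqrt]
  constructor
  · intro H
    refine ⟨by omega, fun m hm hms hd => ?_⟩
    have h1 : m * m ≤ p.toNat := Nat.le_sqrt.mp hms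
    refine H (m : Int) (by exact_mod_cast hm) ?_ ?_
    · rw [← hpcast]; exact_mod_cast h1
    · rw [← hpcast]; exact_mod_cast hd
  · rintro ⟨-, H⟩ j hj hjj hd
    have hjn : (j.toNat : Int) = j := Int.toNat_of_nonneg (by omega)
    refine H j.toNat (by omega) (Nat.le_sqrt.mpr ?_) ?_
    · have : ((j.toNat * j.toNat : ℕ) : Int) ≤ ((p.toNat : ℕ) : Int) := by
        push_cast
        rw [hjn, hpcast]; exact hjj
      exact_mod_cast this
    · have : ((j.toNat : ℕ) : Int) ∣ ((p.toNat : ℕ) : Int) := by rw [hjn, hpcast]; exact hd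
      exact_mod_cast this

-- core: if Fermat holds at every prime base not dividing n', it holds at every coprime base
lemma coprime_pow_mod_eq_one (n' e : ℕ) (hn : 2 ≤ n')
    (H : ∀ p : ℕ, Nat.Prime p → p < n' → ¬ p ∣ n' → p ^ e % n' = 1) :
    ∀ a : ℕ, 2 ≤ a → a < n' → Nat.Coprime a n' → a ^ e % n' = 1 := by
  intro a
  induction a using Nat.strong_induction_on with
  | _ a ih =>
    intro ha2 han hco
    set p := a.minFac with hpdef
    have hpp : Nat.Prime p := Nat.minFac_prime (by omega)
    have hpa : p ∣ a := Nat.minFac_dvd a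
    have hcp : Nat.Coprime p n' := Nat.Coprime.coprime_dvd_left hpa hco
    have hpnd : ¬ p ∣ n' := (Nat.Prime.coprime_iff_not_dvd hpp).mp hcp
    by_cases hpe : p = a
    · exact H a (hpe ▸ hpp) han (hpe ▸ hpnd)
    · have hple : p ≤ a := Nat.le_of_dvd (by omega) hpa
      obtain ⟨b, hb⟩ := hpa
      have hb2 : 2 ≤ b := by
        rcases Nat.lt_or_ge b 2 with h | h
        · interval_cases b <;> omega
        · exact h
      have hba : b < a := by
        have hp2 := hpp.two_le
        nlinarith
      have hcb : Nat.Coprime b n' := Nat.Coprime.coprime_dvd_left ⟨p, by rw [hb]; ring⟩ hco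
      have hb1 : b ^ e % n' = 1 := ih b hba hb2 (by omega) hcb
      have hp1 : p ^ e % n' = 1 := H p hpp (by omega) hpnd
      calc a ^ e % n' = (p ^ e * b ^ e) % n' := by rw [hb, mul_pow]
        _ = (p ^ e % n') * (b ^ e % n') % n' := by rw [Nat.mul_mod]
        _ = 1 := by rw [hp1, hb1, one_mul, Nat.mod_eq_of_lt (by omega)]

lemma fermatLoopA_eq_true (n : Int) (l : List Int) :
    fermatLoopA n l = true ↔
      ∀ a ∈ l, Int.gcd a n = 1 → PySem.Int.powMod a (n - 1).toNat n = 1 := by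
  induction l with
  | nil => simp [fermatLoopA]
  | cons a rest ih =>
    simp only [fermatLoopA]
    split_ifs with h1 h2 <;> simp_all

lemma A_iff (n : Int) (hn : 1 < n) :
    passes_fermat_primality_test n = true ↔
      ∀ a : ℕ, 2 ≤ a → a < n.toNat → Nat.Coprime a n.toNat →
        a ^ (n - 1).toNat % n.toNat = 1 := by
  rw [passes_fermat_primality_test, if_neg (by omega), fermatLoopA_eq_true]
  constructor
  · intro H a ha2 han hco
    have hmem : (a : Int) ∈ PySem.List.pyRange 2 n := by
      rw [PySem.List.mem_pyRange_one]; omega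
    have := H (a : Int) hmem ((gcd_eq_one_iff _ _ (by omega) (by omega)).mpr (by simpa using hco))
    rw [powMod_eq_one_iff _ _ _ (by omega) (by omega)] at this
    simpa using this
  · intro H a hmem hgcd
    rw [PySem.List.mem_pyRange_one] at hmem
    rw [powMod_eq_one_iff _ _ _ (by omega) (by omega)]
    exact H a.toNat (by omega) (by omega)
      ((gcd_eq_one_iff _ _ (by omega) (by omega)).mp hgcd)

lemma B_iff (n : Int) (hn : 1 < n) :
    passes_fermat_primality_test_alt n = true ↔
      ∀ p : ℕ, Nat.Prime p → p < n.toNat → ¬ p ∣ n.toNat →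
        p ^ (n - 1).toNat % n.toNat = 1 := by
  rw [passes_fermat_primality_test_alt, if_neg (by omega), List.all_eq_true]
  constructor
  · intro H p hp hlt hnd
    have hp2 := hp.two_le
    have hmem : (p : Int) ∈ PySem.List.pyRange 2 n := by
      rw [PySem.List.mem_pyRange_one]; omega
    have hfil : (p : Int) ∈ (PySem.List.pyRange 2 n).filter
        (fun p => PySem.Int.mod n p ≠ 0 && pvIsPrime p) := by
      rw [List.mem_filter]
      refine ⟨hmem, ?_⟩
      have h1 : PySem.Int.mod n (p : Int) ≠ 0 := by
        rw [Ne, PySem.Int.mod_eq_zero_iff_dvd]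
        intro hd
        apply hnd
        have : ((p : ℕ) : Int) ∣ ((n.toNat : ℕ) : Int) := by
          rwa [Int.toNat_of_nonneg (by omega : (0:Int) ≤ n)]
        exact_mod_cast this
      have h2 : pvIsPrime (p : Int) = true := by
        rw [pvIsPrime_iff _ (by exact_mod_cast hp2)]
        simpa using hp
      simp [h1, h2]
    have := H _ hfil
    rw [beq_iff_eq] at this
    rw [powMod_eq_one_iff _ _ _ (by omega) (by omega)] at this
    simpa using this
  · intro H p hfil
    rw [List.mem_filter] at hfil
    obtain ⟨hmem, hcond⟩ := hfil
    rw [PySem.List.mem_pyRange_one] at hmem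
    simp only [Bool.and_eq_true, decide_eq_true_eq, ne_eq] at hcond
    obtain ⟨hmod, hprime⟩ := hcond
    rw [pvIsPrime_iff _ (by omega)] at hprime
    rw [beq_iff_eq, powMod_eq_one_iff _ _ _ (by omega) (by omega)]
    refine H p.toNat hprime (by omega) ?_
    intro hd
    apply hmod
    rw [PySem.Int.mod_eq_zero_iff_dvd]
    have : ((p.toNat : ℕ) : Int) ∣ ((n.toNat : ℕ) : Int) := by exact_mod_cast hd
    rwa [Int.toNat_of_nonneg (by omega : (0:Int) ≤ p),
         Int.toNat_of_nonneg (by omega : (0:Int) ≤ n)] at this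

-- ===== VERDICT (by name: the statement is the Claim_ definition above) =====
theorem passes_fermat_primality_test_spec : Claim_equal_passes_fermat_primality_test := by
  intro n _
  unfold Spec_passes_fermat_primality_test
  by_cases hn : n ≤ 1
  · simp [passes_fermat_primality_test, passes_fermat_primality_test_alt, hn]
  · have hn' : 1 < n := by omega
    rw [Bool.eq_iff_iff, A_iff n hn', B_iff n hn']
    have hn2 : 2 ≤ n.toNat := by omega
    constructor
    · intro hA p hp hlt hnd
      exact hA p hp.two_le hlt ((Nat.Prime.coprime_iff_not_dvd hp).mpr hnd)
    · intro hB
      exact coprime_pow_mod_eq_one n.toNat (n - 1).toNat hn2 hB
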